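-- pv_equiv track=rewrite | github.com/Polaris-sg/PatchAssessor | patch_retrieval.py | extract_diff_lines
-- ===== SOURCE A (Python) =====
-- def extract_diff_lines(patch_function, max_lines=30):
--     if not patch_function:
--         return ""
--
--     # 每个改动行前后保留的上下文行数
--     context_lines=5
--
--     lines = patch_function.splitlines()
--
--     # 找出所有修改行索引
--     changed_line_indices = [
--         i for i, line in enumerate(lines)
--         if line.strip().startswith('+') or line.strip().startswith('-')
--     ]
--
--     if not changed_line_indices:
--         return "\n".join(lines[:max_lines])
--
--     # 生成改动区间（包含上下文）
--     intervals = []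
--     for idx in changed_line_indices:
--         start = max(0, idx - context_lines)
--         end = min(len(lines), idx + context_lines + 1)
--         intervals.append((start, end))
--
--     # 合并重叠区间
--     merged_intervals = []
--     for start, end in sorted(intervals):
--         if not merged_intervals or start > merged_intervals[-1][1]:
--             merged_intervals.append([start, end])
--         else:
--             merged_intervals[-1][1] = max(merged_intervals[-1][1], end)
--
--     # 收集所有需要的行
--     selected_lines = []
--     for start, end in merged_intervals:
--         selected_lines.extend(range(start, end))
--
--     # 去重并排序
--     selected_lines = sorted(set(selected_lines))
--
--     # 如果超过 max_lines，优先保留改动行，再补上下文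
--     if len(selected_lines) > max_lines:
--         must_keep = set(changed_line_indices)
--         keep_indices = sorted(must_keep)
--         remaining_slots = max_lines - len(keep_indices)
--
--         if remaining_slots > 0:
--             context_candidates = [i for i in selected_lines if i not in must_keep]
--             keep_indices.extend(context_candidates[:remaining_slots])
--             keep_indices = sorted(set(keep_indices))
--         else:
--             keep_indices = keep_indices[:max_lines]
--
--         return "\n".join(lines[i] for i in keep_indices)
--
--     return "\n".join(lines[i] for i in selected_lines)
-- ===== SOURCE B (Python) =====
-- def extract_diff_lines(patch_function, max_lines=30):
--     if not patch_function:
--         return ""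
--
--     context_lines = 5
--     lines = patch_function.splitlines()
--     n = len(lines)
--
--     # boolean mask of changed lines
--     changed = [line.strip().startswith(('+', '-')) for line in lines]
--
--     if True not in changed:
--         return "\n".join(lines[:max_lines])
--
--     # a line is selected iff some changed line lies within context_lines of it
--     selected = [i for i in range(n)
--                 if any(changed[j] for j in range(max(0, i - context_lines),
--                                                  min(n, i + context_lines + 1)))]
--
--     if len(selected) <= max_lines:
--         return "\n".join(lines[i] for i in selected)
--
--     # overflow: keep all changed lines, fill remaining slots with the
--     # smallest-index context lines, streaming over the ascending 'selected'
--     changed_idx = [i for i in range(n) if changed[i]]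
--     budget = max_lines - len(changed_idx)
--     if budget <= 0:
--         return "\n".join(lines[i] for i in changed_idx[:max_lines])
--
--     out = []
--     for i in selected:
--         if changed[i]:
--             out.append(i)
--         elif budget > 0:
--             out.append(i)
--             budget -= 1
--     return "\n".join(lines[i] for i in out)
-- ===== Notes on version B (the rewrite author's own statement) =====
-- stated objective: alternative
-- what changed: A builds per-change context intervals, sorts and merges them, then sorts the deduplicated union and patches the overflow case by re-sorting a set union; B instead computes a boolean changed-mask and selects each line by a neighbourhood test (is any line within 5 of it changed?) in one filter over all line indices, and handles overflow by a single streaming pass over the ascending selected indices with a context budget counter, with no interval list, no merge pass and no sort-of-set anywhere.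
import Mathlib
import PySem

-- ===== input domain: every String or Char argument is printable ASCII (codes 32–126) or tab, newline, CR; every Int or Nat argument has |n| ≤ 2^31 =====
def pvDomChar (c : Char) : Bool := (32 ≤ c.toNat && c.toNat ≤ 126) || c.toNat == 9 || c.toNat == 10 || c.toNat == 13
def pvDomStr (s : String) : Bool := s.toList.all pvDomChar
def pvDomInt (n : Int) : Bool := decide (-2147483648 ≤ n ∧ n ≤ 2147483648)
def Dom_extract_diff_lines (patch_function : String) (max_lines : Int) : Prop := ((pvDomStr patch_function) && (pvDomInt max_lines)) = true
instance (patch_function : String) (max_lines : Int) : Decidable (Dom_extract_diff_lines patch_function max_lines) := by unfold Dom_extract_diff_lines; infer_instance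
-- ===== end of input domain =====

-- B drops A's interval build, interval sort-and-merge and sorted-set passes: it computes a boolean
-- changed-mask, selects each line index by a neighbourhood test, and fills the overflow case by one
-- streaming pass with a budget counter; objective: alternative (same result, different algorithm).

-- ===== PORT A =====
-- A's merge-loop body (the fold step of the merged_intervals loop)
def pvMergeStep (m : List (Int × Int)) (se : Int × Int) : List (Int × Int) :=
  match m.getLast? with
  | none => m ++ [se]
  | some last =>
    if se.1 > last.2 then m ++ [se]
    else m.dropLast ++ [(last.1, max last.2 se.2)]

def extract_diff_lines (patch_function : String) (max_lines : Int) : String :=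
  if patch_function.toList = [] then "" else
  let context_lines : Int := 5
  let lines := PySem.Str.splitlines patch_function
  let changed_line_indices :=
    ((PySem.List.enumerate lines).filter (fun p =>
        PySem.Str.startswith (PySem.Str.strip p.2) "+" ||
        PySem.Str.startswith (PySem.Str.strip p.2) "-")).map (·.1)
  if changed_line_indices = [] then
    PySem.Str.join "\n" (PySem.List.slice lines none (some max_lines))
  else
    let intervals := changed_line_indices.foldl (fun acc idx =>
        acc ++ [(max 0 (idx - context_lines), min (lines.length : Int) (idx + context_lines + 1))]) []
    let merged_intervals := (PySem.List.sorted2 intervals Prod.fst Prod.snd).foldl pvMergeStep []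
    let selected_lines := merged_intervals.foldl (fun acc se => acc ++ PySem.List.pyRange se.1 se.2) []
    let selected_lines := PySem.List.sorted (PySem.Set.ofList selected_lines) (fun x => x)
    if (selected_lines.length : Int) > max_lines then
      let must_keep := PySem.Set.ofList changed_line_indices
      let keep_indices := PySem.List.sorted must_keep (fun x => x)
      let remaining_slots := max_lines - (keep_indices.length : Int)
      let keep_indices :=
        if remaining_slots > 0 then
          let context_candidates := selected_lines.filter (fun i => !(PySem.Set.contains must_keep i))
          PySem.List.sorted (PySem.Set.ofList
            (keep_indices ++ PySem.List.slice context_candidates none (some remaining_slots))) (fun x => x)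
        else
          PySem.List.slice keep_indices none (some max_lines)
      -- lines[i] : every index used here is in range, so the pyGetD default is never read
      PySem.Str.join "\n" (keep_indices.map (fun i => PySem.List.pyGetD lines i ""))
    else
      PySem.Str.join "\n" (selected_lines.map (fun i => PySem.List.pyGetD lines i ""))

-- ===== PORT B =====
def extract_diff_lines_alt (patch_function : String) (max_lines : Int) : String :=
  if patch_function.toList = [] then "" else
  let context_lines : Int := 5
  let lines := PySem.Str.splitlines patch_function
  let n : Int := (lines.length : Int)
  -- boolean mask of changed lines
  let changed := lines.map (fun line =>
      PySem.Str.startswith (PySem.Str.strip line) "+" ||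
      PySem.Str.startswith (PySem.Str.strip line) "-")
  if !(changed.contains true) then
    PySem.Str.join "\n" (PySem.List.slice lines none (some max_lines))
  else
    -- a line is selected iff some changed line lies within context_lines of it
    -- changed[j] : every j produced by the window range is in [0, n), so the pyGetD default is never read
    let selected := (PySem.List.pyRange 0 n).filter (fun i =>
        (PySem.List.pyRange (max 0 (i - context_lines)) (min n (i + context_lines + 1))).any
          (fun j => PySem.List.pyGetD changed j false))
    if (selected.length : Int) ≤ max_lines then
      PySem.Str.join "\n" (selected.map (fun i => PySem.List.pyGetD lines i ""))
    else
      let changed_idx := (PySem.List.pyRange 0 n).filter (fun i => PySem.List.pyGetD changed i false)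
      let budget := max_lines - (changed_idx.length : Int)
      if budget ≤ 0 then
        PySem.Str.join "\n" ((PySem.List.slice changed_idx none (some max_lines)).map
          (fun i => PySem.List.pyGetD lines i ""))
      else
        -- streaming fill: keep every changed line, spend the budget on context lines in ascending order
        let out := (selected.foldl (fun (st : List Int × Int) i =>
            if PySem.List.pyGetD changed i false then (st.1 ++ [i], st.2)
            else if st.2 > 0 then (st.1 ++ [i], st.2 - 1) else st) ([], budget)).1
        PySem.Str.join "\n" (out.map (fun i => PySem.List.pyGetD lines i ""))

-- ===== PRECONDITION & SPEC =====
def Spec_extract_diff_lines (patch_function : String) (max_lines : Int) (out : String) : Prop := out = extract_diff_lines_alt patch_function max_lines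
instance (patch_function : String) (max_lines : Int) (out : String) : Decidable (Spec_extract_diff_lines patch_function max_lines out) := by unfold Spec_extract_diff_lines; infer_instance

-- ===== CLAIM (what is proved, stated in full; the proofs are below) =====
def Claim_equal_extract_diff_lines : Prop := ∀ (patch_function : String) (max_lines : Int), Dom_extract_diff_lines patch_function max_lines → Spec_extract_diff_lines patch_function max_lines (extract_diff_lines patch_function max_lines)

-- ===== LEMMAS AND PROOFS =====

-- recursion shape of B's streaming fill loop
def pvFill (ch : Int → Bool) : List Int → Int → List Int
  | [], _ => []
  | i :: t, b =>
    if ch i then i :: pvFill ch t b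
    else if b > 0 then i :: pvFill ch t (b - 1)
    else pvFill ch t b

lemma pvFill_foldl (ch : Int → Bool) (sel : List Int) (acc : List Int) (b : Int) :
    (sel.foldl (fun (st : List Int × Int) i =>
        if ch i then (st.1 ++ [i], st.2)
        else if st.2 > 0 then (st.1 ++ [i], st.2 - 1) else st) (acc, b)).1
    = acc ++ pvFill ch sel b := by
  induction sel generalizing acc b with
  | nil => simp [pvFill]
  | cons i t ih =>
    simp only [List.foldl_cons, pvFill]
    by_cases hc : ch i
    · simp [hc, ih]
    · by_cases hb : b > 0
      · simp [hc, hb, ih]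
      · simp [hc, hb, ih]

lemma pvFill_eq_filter (ch : Int → Bool) (sel : List Int) (b : Int) (hnd : sel.Nodup) :
    pvFill ch sel b
      = sel.filter (fun i => ch i || decide (i ∈ (sel.filter (fun i => !ch i)).take b.toNat)) := by
  induction sel generalizing b with
  | nil => simp [pvFill]
  | cons i t ih =>
    obtain ⟨hit, hndt⟩ := List.nodup_cons.mp hnd
    rw [List.filter_cons]
    by_cases hc : ch i
    · have hflt : List.filter (fun x => !ch x) (i :: t) = List.filter (fun x => !ch x) t := by
        simp [List.filter_cons, hc]
      rw [hflt]
      simp only [pvFill, hc, if_true, Bool.true_or, ih b hndt]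
    · rw [show List.filter (fun x => !ch x) (i :: t) = i :: List.filter (fun x => !ch x) t from
        by simp [List.filter_cons, hc]]
      by_cases hb : b > 0
      · have hbt : b.toNat = (b - 1).toNat + 1 := by omega
        rw [hbt, List.take_succ_cons]
        simp only [pvFill, hc, if_false, hb, if_true, ih (b - 1) hndt]
        simp only [List.mem_cons, true_or, decide_true, Bool.or_true, if_true,
          Bool.false_eq_true, if_false]
        congr 1
        apply List.filter_congr
        intro x hx
        have hxi : x ≠ i := fun h => hit (h ▸ hx)
        simp [hxi]
      · have hbt : b.toNat = 0 := by omega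
        rw [hbt, List.take_zero]
        simp only [pvFill, hc, if_false, hb, ih b hndt, hbt]
        simp [hc]

-- two strictly increasing lists with the same members are equal sorted lists
lemma sorted_set_eq_of_mem_iff (xs ys : List Int)
    (hys : ys.Pairwise (· < ·))
    (hmem : ∀ x, x ∈ xs ↔ x ∈ ys) :
    PySem.List.sorted (PySem.Set.ofList xs) (fun x => x) = ys := by
  apply PySem.List.sorted_eq_of_perm_of_pairwise_lt
  · refine (List.perm_ext_iff_of_nodup hys.nodup (PySem.Set.nodup_ofList _)).mpr ?_
    intro x
    rw [PySem.Set.mem_ofList, hmem]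
  · exact hys

lemma pvMergeStep_nil (se : Int × Int) : pvMergeStep [] se = [se] := rfl

lemma pvMergeStep_concat (m : List (Int × Int)) (b se : Int × Int) :
    pvMergeStep (m ++ [b]) se =
      if se.1 > b.2 then m ++ [b] ++ [se] else m ++ [(b.1, max b.2 se.2)] := by
  simp [pvMergeStep]

lemma merge_cover (l : List (Int × Int)) (m : List (Int × Int)) (x : Int)
    (hp : l.Pairwise (fun a b => a.1 ≤ b.1))
    (hm : ∀ last, m.getLast? = some last → ∀ se ∈ l, last.1 ≤ se.1) :
    (∃ se ∈ l.foldl pvMergeStep m, se.1 ≤ x ∧ x < se.2)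
    ↔ (∃ se ∈ m, se.1 ≤ x ∧ x < se.2) ∨ (∃ se ∈ l, se.1 ≤ x ∧ x < se.2) := by
  induction l generalizing m with
  | nil => simp
  | cons a t ih =>
    rw [List.pairwise_cons] at hp
    obtain ⟨ha, hp'⟩ := hp
    rw [List.foldl_cons]
    rcases m.eq_nil_or_concat with rfl | ⟨m', b, rfl⟩
    all_goals simp only [List.concat_eq_append] at *
    · rw [pvMergeStep_nil,
        ih [a] hp' (fun last h se hse => by simp at h; subst h; exact ha se hse)]
      simp only [List.mem_cons, List.not_mem_nil, or_false]
      constructor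
      · rintro (⟨se, rfl, hc⟩ | ⟨se, hse, hc⟩)
        · exact Or.inr ⟨se, Or.inl rfl, hc⟩
        · exact Or.inr ⟨se, Or.inr hse, hc⟩
      · rintro (⟨se, h, hc⟩ | ⟨se, rfl | hse, hc⟩)
        · exact absurd h id
        · exact Or.inl ⟨se, rfl, hc⟩
        · exact Or.inr ⟨se, hse, hc⟩
    · have hb : (m' ++ [b]).getLast? = some b := List.getLast?_concat
      rw [pvMergeStep_concat]
      by_cases hgt : a.1 > b.2
      · rw [if_pos hgt,
          ih _ hp' (fun last h se hse => by
            rw [List.getLast?_concat] at h; cases h; exact ha se hse)]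
        simp only [List.mem_append, List.mem_cons, List.not_mem_nil, or_false]
        constructor
        · rintro (⟨se, h1 | rfl, hc⟩ | ⟨se, hse, hc⟩)
          · exact Or.inl ⟨se, h1, hc⟩
          · exact Or.inr ⟨se, Or.inl rfl, hc⟩
          · exact Or.inr ⟨se, Or.inr hse, hc⟩
        · rintro (⟨se, h1, hc⟩ | ⟨se, rfl | hse, hc⟩)
          · exact Or.inl ⟨se, Or.inl h1, hc⟩
          · exact Or.inl ⟨se, Or.inr rfl, hc⟩
          · exact Or.inr ⟨se, hse, hc⟩
      · rw [if_neg hgt]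
        have hstart : b.1 ≤ a.1 := hm b hb a List.mem_cons_self
        rw [ih _ hp' (fun last h se hse => by
          rw [List.getLast?_concat] at h; cases h
          exact le_trans hstart (ha se hse))]
        simp only [List.mem_append, List.mem_cons, List.not_mem_nil, or_false]
        constructor
        · rintro (⟨se, hse | rfl, hc⟩ | ⟨se, hse, hc⟩)
          · exact Or.inl ⟨se, Or.inl hse, hc⟩
          · by_cases hx : x < b.2
            · exact Or.inl ⟨b, Or.inr rfl, ⟨hc.1, hx⟩⟩
            · have h1 : b.1 ≤ x := hc.1
              have h2 : x < max b.2 a.2 := hc.2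
              exact Or.inr ⟨a, Or.inl rfl, ⟨by omega, by omega⟩⟩
          · exact Or.inr ⟨se, Or.inr hse, hc⟩
        · rintro (⟨se, hse | rfl, hc⟩ | ⟨se, rfl | hse, hc⟩)
          · exact Or.inl ⟨se, Or.inl hse, hc⟩
          · refine Or.inl ⟨(se.1, max se.2 a.2), Or.inr rfl, ⟨hc.1, ?_⟩⟩
            have h2 := hc.2
            have h3 := le_max_left se.2 a.2
            show x < max se.2 a.2
            omega
          · refine Or.inl ⟨(b.1, max b.2 se.2), Or.inr rfl, ⟨?_, ?_⟩⟩
            · show b.1 ≤ x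
              have h1 := hc.1; omega
            · show x < max b.2 se.2
              have h2 := hc.2
              have h3 := le_max_right b.2 se.2
              omega
          · exact Or.inr ⟨se, hse, hc⟩

-- A's tuple sort is the sort by the lexicographic key
lemma sorted2_eq_sorted_toLex (xs : List (Int × Int)) :
    PySem.List.sorted2 xs Prod.fst Prod.snd = PySem.List.sorted xs (fun p => toLex p) := by
  simp only [PySem.List.sorted2, PySem.List.sorted, Bool.false_eq_true, if_false]
  have h : (fun (a b : Int × Int) => decide (a.1 < b.1) || (!decide (b.1 < a.1) && decide (a.2 < b.2)))
      = (fun (a b : Int × Int) => decide ((toLex a : Lex (Int × Int)) < toLex b)) := by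
    funext a b
    apply Bool.eq_iff_iff.mpr
    simp only [Bool.or_eq_true, Bool.and_eq_true, Bool.not_eq_true',
      decide_eq_true_eq, decide_eq_false_iff_not, Prod.Lex.lt_iff, ofLex_toLex]
    omega
  rw [h]

-- A's changed_line_indices, rewritten as a filter over the index range against the mask
lemma idxs_eq_filter (lines : List String) (f : String → Bool) :
    ((PySem.List.enumerate lines).filter (fun p => f p.2)).map (·.1)
      = (PySem.List.pyRange 0 (lines.length : Int)).filter
          (fun i => PySem.List.pyGetD (lines.map f) i false) := by
  rw [PySem.List.enumerate_eq_map_pyRange (d := "")]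
  rw [PySem.List.len_eq]
  rw [List.filter_map, List.map_map]
  have h1 : ((fun p : Int × String => p.1) ∘ fun j => (j, PySem.List.pyGetD lines j ""))
      = id := by funext j; rfl
  rw [h1, List.map_id]
  apply List.filter_congr
  intro i hi
  rw [PySem.List.mem_pyRange_one] at hi
  have hk : i = ((i.toNat : Nat) : Int) := by omega
  rw [hk]
  simp only [Function.comp_apply, PySem.List.pyGetD_natCast]
  have hlt : i.toNat < lines.length := by omega
  simp [List.getD_eq_getElem?_getD, hlt]

-- the no-changed-line tests of the two ports agree
lemma empty_iff_not_contains (changed : List Bool) :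
    ((PySem.List.pyRange 0 (changed.length : Int)).filter
        (fun i => PySem.List.pyGetD changed i false) = [])
      ↔ changed.contains true = false := by
  rw [List.filter_eq_nil_iff]
  constructor
  · intro h
    cases hb : changed.contains true
    · rfl
    · have hmem : true ∈ changed := List.contains_iff_mem.mp hb
      obtain ⟨k, hk, hget⟩ := List.mem_iff_getElem.mp hmem
      exact absurd (by simp [List.getD_eq_getElem?_getD, hk, hget] :
          PySem.List.pyGetD changed ((k : Nat) : Int) false = true)
        (h ((k : Nat) : Int)
          (by rw [PySem.List.mem_pyRange_one]; constructor <;> [omega; exact_mod_cast hk]))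
  · intro h i hi hget
    rw [PySem.List.mem_pyRange_one] at hi
    have hk : i = ((i.toNat : Nat) : Int) := by omega
    rw [hk] at hget
    simp only [PySem.List.pyGetD_natCast] at hget
    have hlt : i.toNat < changed.length := by omega
    rw [List.getD_eq_getElem?_getD] at hget
    simp only [List.getElem?_eq_getElem hlt] at hget
    have hmem : true ∈ changed := hget ▸ List.getElem_mem hlt
    simp_all

-- A's sorted deduplicated union of merged context intervals is B's neighbourhood filter
lemma selected_eq (g : Int → Bool) (n : Int)
    (hidxs : ∀ idx, idx ∈ (PySem.List.pyRange 0 n).filter g ↔ (0 ≤ idx ∧ idx < n) ∧ g idx) :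
    PySem.List.sorted (PySem.Set.ofList
      (((PySem.List.sorted2 (((PySem.List.pyRange 0 n).filter g).foldl (fun acc idx =>
            acc ++ [(max 0 (idx - 5), min n (idx + 5 + 1))]) []) Prod.fst Prod.snd).foldl
        pvMergeStep []).foldl
        (fun acc se => acc ++ PySem.List.pyRange se.1 se.2) [])) (fun x => x)
    = (PySem.List.pyRange 0 n).filter (fun i =>
        (PySem.List.pyRange (max 0 (i - 5)) (min n (i + 5 + 1))).any g) := by
  apply sorted_set_eq_of_mem_iff
  · exact (PySem.List.pairwise_lt_pyRange_one 0 n).filter _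
  · intro x
    rw [PySem.List.foldl_append_eq_flatMap, List.nil_append, List.mem_flatMap]
    simp only [PySem.List.foldl_append_singleton_eq_map, List.nil_append]
    have hpair : (PySem.List.sorted2 ((((PySem.List.pyRange 0 n).filter g)).map (fun idx =>
        (max 0 (idx - 5), min n (idx + 5 + 1)))) Prod.fst Prod.snd).Pairwise
        (fun a b => a.1 ≤ b.1) := by
      rw [sorted2_eq_sorted_toLex]
      refine (PySem.List.sorted_pairwise _ _).imp ?_
      intro a b h
      have h2 := Prod.Lex.le_iff.mp h
      simp only [ofLex_toLex] at h2
      omega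
    have hcov := merge_cover _ [] x hpair (by simp)
    simp only [PySem.List.mem_pyRange_one] at hcov ⊢
    rw [show (∃ se ∈ ((PySem.List.sorted2 ((((PySem.List.pyRange 0 n).filter g)).map (fun idx =>
        (max 0 (idx - 5), min n (idx + 5 + 1)))) Prod.fst Prod.snd).foldl pvMergeStep []),
        se.1 ≤ x ∧ x < se.2) ↔ _ from hcov]
    simp only [List.not_mem_nil, false_and, exists_false, false_or,
      List.Perm.mem_iff (PySem.List.sorted2_perm _ _ _ _), List.mem_map,
      exists_exists_and_eq_and]
    rw [List.mem_filter, List.any_eq_true]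
    simp only [PySem.List.mem_pyRange_one]
    constructor
    · rintro ⟨idx, hidx', hle, hlt⟩
      have := (hidxs idx).mp hidx'
      refine ⟨⟨by omega, by omega⟩, idx, ⟨by omega, by omega⟩, this.2⟩
    · rintro ⟨⟨hx0, hxn⟩, j, ⟨hj1, hj2⟩, hg⟩
      refine ⟨j, (hidxs j).mpr ⟨⟨by omega, by omega⟩, hg⟩, by omega, by omega⟩

-- the overflow fill: A's sorted set union equals the budget filter
lemma keep_eq_filter (g : Int → Bool) (sel : List Int) (b : Nat)
    (hsp : sel.Pairwise (· < ·)) :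
    PySem.List.sorted (PySem.Set.ofList
        (sel.filter g ++ (sel.filter (fun i => !g i)).take b)) (fun x => x)
      = sel.filter (fun i => g i || decide (i ∈ (sel.filter (fun i => !g i)).take b)) := by
  apply sorted_set_eq_of_mem_iff
  · exact hsp.filter _
  · intro x
    rw [List.mem_append, List.mem_filter, List.mem_filter]
    simp only [Bool.or_eq_true, decide_eq_true_eq]
    constructor
    · rintro (⟨hs, hg⟩ | ht)
      · exact ⟨hs, Or.inl hg⟩
      · have hx : x ∈ sel := List.mem_of_mem_filter (List.mem_of_mem_take ht)
        exact ⟨hx, Or.inr ht⟩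
    · rintro ⟨hs, hg | ht⟩
      · exact Or.inl ⟨hs, hg⟩
      · exact Or.inr ht

-- ===== VERDICT (by name: the statement is the Claim_ definition above) =====
set_option maxHeartbeats 2000000 in
theorem extract_diff_lines_spec : Claim_equal_extract_diff_lines := by
  intro patch_function max_lines _
  unfold Spec_extract_diff_lines extract_diff_lines extract_diff_lines_alt
  by_cases h0 : patch_function.toList = []
  · rw [if_pos h0, if_pos h0]
  · rw [if_neg h0, if_neg h0]
    dsimp only
    set lines := PySem.Str.splitlines patch_function with hlines
    set f : String → Bool := fun line =>
      PySem.Str.startswith (PySem.Str.strip line) "+" ||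
      PySem.Str.startswith (PySem.Str.strip line) "-" with hf
    set n : Int := (lines.length : Int) with hn
    set changed := lines.map f with hchanged
    set g : Int → Bool := fun i => PySem.List.pyGetD changed i false with hg
    have hidxs : ((PySem.List.enumerate lines).filter (fun p => f p.2)).map (·.1)
        = (PySem.List.pyRange 0 n).filter g := by
      rw [hg, hchanged, hn]
      exact idxs_eq_filter lines f
    have hn2 : n = (changed.length : Int) := by rw [hchanged, List.length_map, hn]
    have hEI := empty_iff_not_contains changed
    rw [← hn2, ← hg] at hEI
    have hmemC : ∀ idx, idx ∈ (PySem.List.pyRange 0 n).filter g ↔ (0 ≤ idx ∧ idx < n) ∧ g idx := by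
      intro idx
      rw [List.mem_filter, PySem.List.mem_pyRange_one]
    rw [hidxs]
    by_cases hemp : (PySem.List.pyRange 0 n).filter g = []
    · rw [if_pos hemp, hEI.mp hemp]
      rfl
    · rw [if_neg hemp]
      have hcont : changed.contains true = true := by
        cases h : changed.contains true
        · exact absurd (hEI.mpr h) hemp
        · rfl
      rw [hcont]
      simp only [Bool.not_true, Bool.false_eq_true, if_false]
      rw [selected_eq g n hmemC]
      set sel := (PySem.List.pyRange 0 n).filter (fun i =>
        (PySem.List.pyRange (max 0 (i - 5)) (min n (i + 5 + 1))).any g) with hsel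
      have hselp : sel.Pairwise (· < ·) := (PySem.List.pairwise_lt_pyRange_one 0 n).filter _
      have hC : (PySem.List.pyRange 0 n).filter g = sel.filter g := by
        rw [hsel, List.filter_filter]
        apply List.filter_congr
        intro i hi
        rw [PySem.List.mem_pyRange_one] at hi
        cases hgi : g i
        · simp
        · simp only [Bool.true_and, Bool.and_true]
          exact (List.any_eq_true.mpr
            ⟨i, by rw [PySem.List.mem_pyRange_one]; omega, hgi⟩).symm
      set C := (PySem.List.pyRange 0 n).filter g with hCdef
      have hCnodup : C.Nodup := ((PySem.List.nodup_pyRange_one 0 n).filter _)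
      have hCpair : C.Pairwise (· < ·) := (PySem.List.pairwise_lt_pyRange_one 0 n).filter _
      have hofC : PySem.Set.ofList C = C := PySem.Set.ofList_eq_self_of_nodup C hCnodup
      have hsortC : PySem.List.sorted C (fun x => x) = C :=
        PySem.List.sorted_eq_of_perm_of_pairwise_lt C C (fun x => x) (List.Perm.refl C) hCpair
      by_cases hlenle : (sel.length : Int) ≤ max_lines
      · rw [if_neg (by omega), if_pos hlenle]
      · rw [if_pos (by omega : (sel.length : Int) > max_lines), if_neg hlenle]
        rw [hofC, hsortC]
        by_cases hrs : max_lines - (C.length : Int) ≤ 0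
        · rw [if_neg (by omega), if_pos hrs]
        · rw [if_pos (by omega : max_lines - (C.length : Int) > 0), if_neg hrs]
          have hctx : sel.filter (fun i => !(PySem.Set.contains C i))
              = sel.filter (fun i => !g i) := by
            apply List.filter_congr
            intro i hi
            have hin : i ∈ PySem.List.pyRange 0 n := List.mem_of_mem_filter hi
            rw [PySem.List.mem_pyRange_one] at hin
            congr 1
            simp only [PySem.Set.contains_eq_listContains]
            cases hgi : g i
            · cases hc : C.contains i
              · rfl
              · exact absurd ((hmemC i).mp (List.contains_iff_mem.mp hc)).2 (by simp [hgi])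
            · exact List.contains_iff_mem.mpr ((hmemC i).mpr ⟨⟨hin.1, hin.2⟩, hgi⟩)
          rw [hctx]
          rw [show PySem.List.slice (sel.filter (fun i => !g i)) none
              (some (max_lines - (C.length : Int)))
              = (sel.filter (fun i => !g i)).take (max_lines - (C.length : Int)).toNat from
            PySem.List.slice_to _ (by omega)]
          rw [hC, keep_eq_filter g sel _ hselp]
          rw [pvFill_foldl, List.nil_append,
            pvFill_eq_filter g sel _ hselp.nodup]
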